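-- pv_equiv track=rewrite | github.com/ybkim95/baek-joon | 7/2941.py | check
-- ===== SOURCE A (Python) =====
-- def check(word):
--     corpus = ['c=', 'c-', 'dz=', 'd-', 'lj', 'nj', 's=', 'z=']
--
--     cnt = 0
--
--     for c in corpus:
--         if word.find(c) != -1:
--             cnt += 1
--
--     if cnt == 0:
--         return True
--
--     else:
--         return False
-- ===== SOURCE B (Python) =====
-- def check(word):
--     patterns = ('c=', 'c-', 'dz=', 'd-', 'lj', 'nj', 's=', 'z=')
--     for i in range(len(word)):
--         if word.startswith(patterns, i):
--             return False
--     return True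
-- ===== Notes on version B (the rewrite author's own statement) =====
-- stated objective: alternative
-- what changed: Replaced eight separate word.find scans plus a counter with a single left-to-right pass that checks at each position whether any of the eight patterns starts there (tuple startswith), returning False at the first hit.
import Mathlib
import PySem

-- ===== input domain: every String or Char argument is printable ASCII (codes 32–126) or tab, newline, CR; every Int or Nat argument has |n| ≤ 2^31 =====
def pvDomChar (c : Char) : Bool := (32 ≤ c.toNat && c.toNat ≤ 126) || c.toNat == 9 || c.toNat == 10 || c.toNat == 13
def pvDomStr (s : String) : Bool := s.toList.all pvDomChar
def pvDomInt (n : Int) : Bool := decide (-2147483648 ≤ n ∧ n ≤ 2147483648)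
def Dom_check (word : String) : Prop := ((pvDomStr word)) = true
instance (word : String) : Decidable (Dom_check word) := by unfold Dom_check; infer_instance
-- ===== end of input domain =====

-- B replaces A's eight whole-string find scans with a counter by one left-to-right pass checking at each position whether any pattern starts there (alternative decomposition, same cost).

-- ===== PORT A =====
-- literal port of A: loop over the corpus counting patterns found by word.find, then cnt == 0
def check (word : String) : Bool :=
  let corpus : List String := ["c=", "c-", "dz=", "d-", "lj", "nj", "s=", "z="]
  let cnt : Int := corpus.foldl (fun cnt c => if PySem.Str.find word c != -1 then cnt + 1 else cnt) 0
  if cnt == 0 then true else false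

-- ===== PORT B =====
-- B's tuple of the eight patterns, as character lists
def pvPatterns : List (List Char) :=
  [['c','='], ['c','-'], ['d','z','='], ['d','-'], ['l','j'], ['n','j'], ['s','='], ['z','=']]

-- B's loop over positions i = 0..len-1 (word.startswith(patterns, i)): recursion on the suffix
def pvScan : List Char → Bool
  | [] => false
  | c :: rest => pvPatterns.any (fun p => p.isPrefixOf (c :: rest)) || pvScan rest

def check_alt (word : String) : Bool := !(pvScan word.toList)

-- ===== PRECONDITION & SPEC =====
def Spec_check (word : String) (out : Bool) : Prop := out = check_alt word
instance (word : String) (out : Bool) : Decidable (Spec_check word out) := by unfold Spec_check; infer_instance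

-- ===== CLAIM (what is proved, stated in full; the proofs are below) =====
def Claim_equal_check : Prop := ∀ (word : String), Dom_check word → Spec_check word (check word)

-- ===== LEMMAS AND PROOFS =====

-- B's scan finds a hit iff some pattern is an infix
lemma pvScan_iff (l : List Char) : pvScan l = true ↔ ∃ p ∈ pvPatterns, p <:+: l := by
  induction l with
  | nil =>
      simp only [pvScan, List.infix_nil]
      constructor
      · intro h; cases h
      · rintro ⟨p, hp, rfl⟩; simp [pvPatterns] at hp
  | cons c rest ih =>
      simp only [pvScan, Bool.or_eq_true, List.any_eq_true, List.isPrefixOf_iff_prefix, ih,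
        List.infix_cons_iff]
      constructor
      · rintro (⟨p, hp, h⟩ | ⟨p, hp, h⟩) <;> exact ⟨p, hp, by tauto⟩
      · rintro ⟨p, hp, h | h⟩
        · exact Or.inl ⟨p, hp, h⟩
        · exact Or.inr ⟨p, hp, h⟩

-- A returns true iff none of the eight patterns is an infix
lemma check_true_iff (word : String) :
    check word = true ↔ ∀ p ∈ pvPatterns, ¬ p <:+: word.toList := by
  unfold check
  simp only [beq_iff_eq, bne_iff_ne, ne_eq, not_not, PySem.Str.find_eq_neg_one_iff]
  rw [PySem.List.foldl_ite_add_one]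
  simp only [Int.zero_add, Int.natCast_eq_zero, List.countP_eq_zero, decide_eq_true_eq]
  constructor
  · intro h
    split_ifs at h with hz
    · intro p hp
      simp only [List.forall_mem_cons] at hz
      fin_cases hp <;> simp_all
  · intro h
    have hz : ∀ s ∈ (["c=", "c-", "dz=", "d-", "lj", "nj", "s=", "z="] : List String),
        ¬ s.toList <:+: word.toList := by
      intro s hs
      fin_cases hs <;> simpa using h _ (by simp [pvPatterns])
    rw [if_pos hz]
-- ===== VERDICT (by name: the statement is the Claim_ definition above) =====
theorem check_spec : Claim_equal_check := by
  intro word _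
  unfold Spec_check check_alt
  rcases hb : pvScan word.toList with _ | _
  · have hno : ∀ p ∈ pvPatterns, ¬ p <:+: word.toList := by
      intro p hp hinf
      have : pvScan word.toList = true := (pvScan_iff _).2 ⟨p, hp, hinf⟩
      simp [hb] at this
    simp [(check_true_iff word).2 hno]
  · obtain ⟨p, hp, hinf⟩ := (pvScan_iff _).1 hb
    have : ¬ check word = true := fun h => (check_true_iff word).1 h p hp hinf
    simp_all
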